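-- pv_equiv track=rewrite | github.com/ZuoTianyu/Experiments | OfflineAlgorithmN.py | FindHighestCross
-- ===== SOURCE A (Python) =====
-- def FindHighestCross(start, end, requests, previous, transfer_cost):
--     highestCross = start;           ##highestCross is the highest index of request r_h between r_{p(i)} and r_{i} s.t. t_{h}-t_{p(h)} < transfer_cost
--     candidate = [];
--     first_request = [];             ##this list is used to store the indexes of candidate requests
--
--
--     ##use this for-loop to find the set of candidate requests
--     for i in range(start+1, end):
--         if previous[i] < start and previous[i]>-1:
--             candidate.append(i);
--             if requests[i]-requests[previous[i]] <= transfer_cost and i > highestCross: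
--                 highestCross = i;
--
--     ##rule out some of the candidate requests if they are before the request with index highestCross
--     #for request in first_request:
--         #if request < highestCross:
--         #    first_request.remove(request);
--     first_request = [x for x in candidate if x>=highestCross];
--
--     return first_request;
-- ===== SOURCE B (Python) =====
-- def FindHighestCross(start, end, requests, previous, transfer_cost):
--     # scan BACKWARDS and stop at the first (= highest) crossing index; default start
--     highestCross = start
--     for i in range(end - 1, start, -1):
--         p = previous[i]
--         if p < start and p > -1 and requests[i] - requests[p] <= transfer_cost:
--             highestCross = i
--             break
--     # single filtering pass; no intermediate candidate list
--     return [i for i in range(start + 1, end)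
--             if previous[i] < start and previous[i] > -1 and i >= highestCross]
-- ===== Notes on version B (the rewrite author's own statement) =====
-- stated objective: alternative
-- what changed: Replaces A's forward accumulator loop (building a candidate list while tracking a running max) by a backward early-exit scan that finds the highest crossing index directly, followed by a single filtering comprehension; no intermediate candidate list is built.
import Mathlib
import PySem

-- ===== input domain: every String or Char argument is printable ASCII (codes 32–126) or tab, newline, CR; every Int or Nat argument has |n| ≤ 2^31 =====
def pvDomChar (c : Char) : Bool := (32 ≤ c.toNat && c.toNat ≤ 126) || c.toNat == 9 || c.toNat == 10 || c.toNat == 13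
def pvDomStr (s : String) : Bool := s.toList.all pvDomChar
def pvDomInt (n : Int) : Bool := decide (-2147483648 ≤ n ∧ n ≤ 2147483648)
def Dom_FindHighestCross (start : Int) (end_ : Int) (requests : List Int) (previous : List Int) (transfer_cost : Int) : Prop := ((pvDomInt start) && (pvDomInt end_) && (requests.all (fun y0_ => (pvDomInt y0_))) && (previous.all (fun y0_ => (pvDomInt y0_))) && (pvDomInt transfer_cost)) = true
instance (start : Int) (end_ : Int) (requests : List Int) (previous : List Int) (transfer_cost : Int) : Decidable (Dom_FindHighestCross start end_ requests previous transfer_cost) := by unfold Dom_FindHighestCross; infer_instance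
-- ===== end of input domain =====

-- B replaces A's forward accumulator loop by a backward early-exit scan for the highest
-- crossing index plus a single filtering pass (objective: alternative decomposition).

-- ===== PORT A =====
def FindHighestCross (start : Int) (end_ : Int) (requests : List Int) (previous : List Int) (transfer_cost : Int) : List Int :=
  let st := (PySem.List.pyRange (start + 1) end_ 1).foldl
    (fun (s : Int × List Int) i =>
      match PySem.List.pyGet? previous i with
      | some p =>
        if p < start ∧ p > -1 then
          match PySem.List.pyGet? requests i, PySem.List.pyGet? requests p with
          | some ri, some rp =>
            if ri - rp ≤ transfer_cost ∧ i > s.1 then (i, s.2 ++ [i]) else (s.1, s.2 ++ [i])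
          | _, _ => (s.1, s.2 ++ [i])   -- Python raises IndexError here; excluded by Pre_
        else s
      | none => s)                       -- Python raises IndexError here; excluded by Pre_
    (start, ([] : List Int))
  st.2.filter (fun x => decide (x ≥ st.1))

-- ===== PORT B =====
-- indexing is ported with pyGet? (exact Python index semantics); the `.getD 0` default is
-- only reachable where Source B raises IndexError, i.e. outside Pre_
def FindHighestCross_alt (start : Int) (end_ : Int) (requests : List Int) (previous : List Int) (transfer_cost : Int) : List Int :=
  let h := ((PySem.List.pyRange (end_ - 1) start (-1)).find? (fun i =>
      let p := (PySem.List.pyGet? previous i).getD 0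
      decide (p < start ∧ p > -1) &&
        decide ((PySem.List.pyGet? requests i).getD 0 - (PySem.List.pyGet? requests p).getD 0 ≤ transfer_cost))).getD start
  (PySem.List.pyRange (start + 1) end_ 1).filter (fun i =>
    (let p := (PySem.List.pyGet? previous i).getD 0
     decide (p < start ∧ p > -1)) && decide (i ≥ h))

-- ===== PRECONDITION & SPEC =====
-- per-index check: previous[i] exists (Python index semantics, negative wrap allowed) and,
-- when i is a candidate, the two requests accesses A performs are in range
def pvIdxOk (start : Int) (requests previous : List Int) (i : Int) : Bool :=
  (PySem.List.pyGet? previous i).isSome &&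
    (let p := (PySem.List.pyGet? previous i).getD 0
     !(decide (p < start ∧ p > -1)) ||
       ((PySem.List.pyGet? requests i).isSome && (PySem.List.pyGet? requests p).isSome))

-- Pre_ holds exactly when Python A returns normally (no IndexError); the leading bounds
-- disjunct only short-circuits the per-index scan when the loop range is huge but some
-- previous[i] is out of range (A raises there anyway).
def Pre_FindHighestCross (start : Int) (end_ : Int) (requests : List Int) (previous : List Int) (transfer_cost : Int) : Prop :=
  (decide (end_ ≤ start + 1) ||
    (decide (-(previous.length : Int) ≤ start + 1 ∧ end_ ≤ (previous.length : Int)) &&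
      (PySem.List.pyRange (start + 1) end_ 1).all (pvIdxOk start requests previous))) = true
instance (start : Int) (end_ : Int) (requests : List Int) (previous : List Int) (transfer_cost : Int) : Decidable (Pre_FindHighestCross start end_ requests previous transfer_cost) := by unfold Pre_FindHighestCross; infer_instance

def pvWitness_FindHighestCross : Int × Int × List Int × List Int × Int := (1, 4, [1, 2, 3, 4], [-1, 0, 0, 1], 5)

def Spec_FindHighestCross (start : Int) (end_ : Int) (requests : List Int) (previous : List Int) (transfer_cost : Int) (out : List Int) : Prop := out = FindHighestCross_alt start end_ requests previous transfer_cost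
instance (start : Int) (end_ : Int) (requests : List Int) (previous : List Int) (transfer_cost : Int) (out : List Int) : Decidable (Spec_FindHighestCross start end_ requests previous transfer_cost out) := by unfold Spec_FindHighestCross; infer_instance

-- ===== CLAIM (what is proved, stated in full; the proofs are below) =====
def Claim_equal_FindHighestCross : Prop := ∀ (start : Int) (end_ : Int) (requests : List Int) (previous : List Int) (transfer_cost : Int), Dom_FindHighestCross start end_ requests previous transfer_cost → Pre_FindHighestCross start end_ requests previous transfer_cost → Spec_FindHighestCross start end_ requests previous transfer_cost (FindHighestCross start end_ requests previous transfer_cost)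

-- ===== LEMMAS AND PROOFS =====

-- candidate predicate (the `previous[i] < start and previous[i] > -1` test), getD form
def pvCandD (start : Int) (previous : List Int) (i : Int) : Bool :=
  let p := (PySem.List.pyGet? previous i).getD 0
  decide (p < start ∧ p > -1)

-- crossing predicate (candidate and requests[i]-requests[previous[i]] <= transfer_cost)
def pvCrossD (start : Int) (requests previous : List Int) (transfer_cost : Int) (i : Int) : Bool :=
  let p := (PySem.List.pyGet? previous i).getD 0
  decide (p < start ∧ p > -1) &&
    decide ((PySem.List.pyGet? requests i).getD 0 - (PySem.List.pyGet? requests p).getD 0 ≤ transfer_cost)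

-- find? on the reverse = last match
theorem find?_reverse_eq_getLast? (p : Int → Bool) (L : List Int) :
    L.reverse.find? p = (L.filter p).getLast? := by
  induction L using List.reverseRecOn with
  | nil => rfl
  | append_singleton L x ih =>
    rw [List.reverse_append, List.reverse_singleton, List.singleton_append,
      List.find?_cons, List.filter_append, List.filter_cons, List.filter_nil]
    by_cases hx : p x = true
    · rw [if_pos hx, hx, List.getLast?_concat]
    · have hx' : p x = false := by simpa using hx
      rw [if_neg hx, hx', List.append_nil]
      exact ih

-- characterisation of A's fold: final highestCross is the last crossing index (default start),
-- final candidate list is the filter of the range by the candidate predicate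
theorem foldA_char (start : Int) (requests previous : List Int) (transfer_cost : Int)
    (L : List Int) (hmono : ∀ x ∈ L, start < x) (hpw : L.Pairwise (· < ·))
    (hok : ∀ i ∈ L, pvIdxOk start requests previous i = true) :
    L.foldl
      (fun (s : Int × List Int) i =>
        match PySem.List.pyGet? previous i with
        | some p =>
          if p < start ∧ p > -1 then
            match PySem.List.pyGet? requests i, PySem.List.pyGet? requests p with
            | some ri, some rp =>
              if ri - rp ≤ transfer_cost ∧ i > s.1 then (i, s.2 ++ [i]) else (s.1, s.2 ++ [i])
            | _, _ => (s.1, s.2 ++ [i])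
          else s
        | none => s)
      (start, ([] : List Int))
    = (((L.filter (pvCrossD start requests previous transfer_cost)).getLast?).getD start,
       L.filter (pvCandD start previous)) := by
  induction L using List.reverseRecOn with
  | nil => rfl
  | append_singleton L x ih =>
    have hpwL : L.Pairwise (· < ·) := (List.pairwise_append.mp hpw).1
    have hltx : ∀ y ∈ L, y < x := by
      intro y hy
      exact (List.pairwise_append.mp hpw).2.2 y hy x (List.mem_singleton_self x)
    have hmL : ∀ y ∈ L, start < y := fun y hy => hmono y (List.mem_append_left _ hy)
    have hokL : ∀ i ∈ L, pvIdxOk start requests previous i = true :=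
      fun i hi => hok i (List.mem_append_left _ hi)
    have hsx : start < x := hmono x (List.mem_append_right _ (List.mem_singleton_self x))
    have hokx : pvIdxOk start requests previous x = true :=
      hok x (List.mem_append_right _ (List.mem_singleton_self x))
    rw [List.foldl_append, List.foldl_cons, List.foldl_nil, ih hmL hpwL hokL,
      List.filter_append, List.filter_append, List.filter_cons, List.filter_nil,
      List.filter_cons, List.filter_nil]
    -- analyse the step at x
    cases hp : PySem.List.pyGet? previous x with
    | none =>
      unfold pvIdxOk at hokx
      rw [hp] at hokx
      exact absurd hokx (by simp)
    | some p =>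
      by_cases hc : p < start ∧ p > -1
      · -- x is a candidate
        have hsome : (PySem.List.pyGet? requests x).isSome = true ∧
            (PySem.List.pyGet? requests p).isSome = true := by
          unfold pvIdxOk at hokx
          rw [hp] at hokx
          simpa [hc] using hokx
        obtain ⟨ri, hri⟩ := Option.isSome_iff_exists.mp hsome.1
        obtain ⟨rp, hrp⟩ := Option.isSome_iff_exists.mp hsome.2
        have hcand : pvCandD start previous x = true := by simp [pvCandD, hp, hc]
        have hgt : ((L.filter (pvCrossD start requests previous transfer_cost)).getLast?).getD start < x := by
          cases hlast : (L.filter (pvCrossD start requests previous transfer_cost)).getLast? with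
          | none => simpa [hlast] using hsx
          | some y =>
            have hyL : y ∈ L := List.mem_of_mem_filter (List.mem_of_getLast? hlast)
            simpa [hlast] using hltx y hyL
        by_cases hle : ri - rp ≤ transfer_cost
        · -- x is a crossing: highestCross becomes x
          have hcross : pvCrossD start requests previous transfer_cost x = true := by
            simp [pvCrossD, hp, hc, hri, hrp, hle]
          simp only [hp, if_pos hc, hri, hrp]
          rw [if_pos ⟨hle, hgt⟩, if_pos hcross, if_pos hcand]
          rw [List.getLast?_concat]
          rfl
        · -- candidate but not a crossing
          have hncross : pvCrossD start requests previous transfer_cost x = false := by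
            simp [pvCrossD, hp, hc, hri, hrp, hle]
          simp only [hp, if_pos hc, hri, hrp]
          rw [if_neg (by intro hcon; exact hle hcon.1), if_neg (by simp [hncross]), if_pos hcand]
          rw [List.append_nil]
      · -- not a candidate: state unchanged, filters drop x
        have hncross : pvCrossD start requests previous transfer_cost x = false := by
          simp [pvCrossD, hp, hc]
        have hncand : pvCandD start previous x = false := by
          simp [pvCandD, hp, hc]
        simp only [hp, if_neg hc]
        rw [if_neg (by simp [hncross]), if_neg (by simp [hncand]), List.append_nil, List.append_nil]

-- Pre_ gives the per-index check on every loop index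
theorem pre_idxOk (start end_ : Int) (requests previous : List Int) (transfer_cost : Int)
    (hpre : Pre_FindHighestCross start end_ requests previous transfer_cost) :
    ∀ i ∈ PySem.List.pyRange (start + 1) end_ 1, pvIdxOk start requests previous i = true := by
  unfold Pre_FindHighestCross at hpre
  rcases Bool.or_eq_true_iff.mp hpre with h | h
  · intro i hi
    have hmem := PySem.List.mem_pyRange_one.mp hi
    have : end_ ≤ start + 1 := of_decide_eq_true h
    omega
  · exact List.all_eq_true.mp (Bool.and_elim_right h)

-- ===== VERDICT (by name: the statement is the Claim_ definition above) =====
theorem FindHighestCross_spec : Claim_equal_FindHighestCross := by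
  intro start end_ requests previous transfer_cost hdom hpre
  unfold Spec_FindHighestCross FindHighestCross FindHighestCross_alt
  have hok := pre_idxOk start end_ requests previous transfer_cost hpre
  have hmono : ∀ x ∈ PySem.List.pyRange (start + 1) end_ 1, start < x := by
    intro x hx; have := PySem.List.mem_pyRange_one.mp hx; omega
  have hpw := PySem.List.pairwise_lt_pyRange_one (a := start + 1) (b := end_)
  rw [foldA_char start requests previous transfer_cost _ hmono hpw hok]
  -- rewrite B's backward range as the reverse of the forward range
  have hrev : PySem.List.pyRange (end_ - 1) start (-1)
      = (PySem.List.pyRange (start + 1) end_ 1).reverse := by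
    rw [PySem.List.pyRange_neg_one_eq_reverse]
    norm_num
  rw [hrev]
  -- B's find? predicate is pvCrossD; B's filter predicate is pvCandD && (· ≥ h)
  rw [show (fun i =>
      let p := (PySem.List.pyGet? previous i).getD 0
      decide (p < start ∧ p > -1) &&
        decide ((PySem.List.pyGet? requests i).getD 0 - (PySem.List.pyGet? requests p).getD 0 ≤ transfer_cost))
    = pvCrossD start requests previous transfer_cost from rfl]
  rw [find?_reverse_eq_getLast?]
  rw [List.filter_filter]
  apply List.filter_congr
  intro i hi
  rw [Bool.and_comm]
  rfl
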